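-- pv_equiv track=rewrite | github.com/lindanceleaf/AutoScore | utils/google_sheet.py | next_col
-- ===== SOURCE A (Python) =====
-- def next_col(col: str) -> str:
--     """
--     計算下一個 Excel 樣式的欄位名稱。
--     :param col: 當前欄位名稱（如 'D', 'Z', 'AA'）
--     :return: 下一個欄位名稱（如 'E', 'AA', 'AB'）
--     """
--     result = list(col)
--     for i in range(len(result) - 1, -1, -1):
--         if result[i] == 'Z':
--             result[i] = 'A'
--             if i == 0:
--                 result.insert(0, 'A')
--         else:
--             result[i] = chr(ord(result[i]) + 1)
--             break
--     return ''.join(result)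
-- ===== SOURCE B (Python) =====
-- def next_col(col: str) -> str:
--     if not col:
--         return col
--     stripped = col.rstrip('Z')
--     if not stripped:
--         return 'A' * (len(col) + 1)
--     return stripped[:-1] + chr(ord(stripped[-1]) + 1) + 'A' * (len(col) - len(stripped))
-- ===== Notes on version B (the rewrite author's own statement) =====
-- stated objective: simpler
-- what changed: Replaces the reverse index loop with per-character mutation and a mid-loop break by stripping the trailing 'Z' run (rstrip) and building the result in one concatenation: prefix + incremented pivot char + 'A'-padding.
import Mathlib
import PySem

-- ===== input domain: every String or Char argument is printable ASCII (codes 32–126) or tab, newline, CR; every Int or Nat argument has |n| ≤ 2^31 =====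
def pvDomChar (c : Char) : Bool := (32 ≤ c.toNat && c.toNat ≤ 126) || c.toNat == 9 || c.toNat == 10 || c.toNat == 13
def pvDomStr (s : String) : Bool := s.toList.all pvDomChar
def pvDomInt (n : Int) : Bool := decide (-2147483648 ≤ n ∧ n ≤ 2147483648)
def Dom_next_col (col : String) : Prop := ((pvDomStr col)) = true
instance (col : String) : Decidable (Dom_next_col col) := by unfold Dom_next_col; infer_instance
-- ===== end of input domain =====

-- B replaces A's reverse index loop by stripping the trailing 'Z' run and one concatenation (simpler; same behaviour on all inputs).

-- ===== PORT A =====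
-- A's for-loop over i = len-1 … 0 with early break, as a countdown recursion: k iterations remain, current index i = k-1.
def nextColLoopA (res : List Char) : Nat → List Char
  | 0 => res
  | k + 1 =>
      if res.getD k 'A' == 'Z' then
        let res' := res.set k 'A'
        if k == 0 then 'A' :: res' else nextColLoopA res' k
      else
        res.set k (Char.ofNat ((res.getD k 'A').toNat + 1))   -- break

def next_col (col : String) : String :=
  String.mk (nextColLoopA col.toList col.toList.length)

-- ===== PORT B =====
-- Source B: empty guard; rstrip('Z') = drop the trailing run of 'Z'; then slicing + chr(ord+1) + 'A'-padding.
def next_col_alt (col : String) : String :=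
  if col.toList = [] then col
  else
    let rev := col.toList.reverse
    let strippedRev := rev.dropWhile (· == 'Z')          -- rstrip('Z'), reversed
    match strippedRev with
    | [] => String.mk (List.replicate (col.toList.length + 1) 'A')
    | c :: rest =>
        String.mk (rest.reverse ++ [Char.ofNat (c.toNat + 1)]
                   ++ List.replicate (rev.takeWhile (· == 'Z')).length 'A')

-- ===== PRECONDITION & SPEC =====
def Spec_next_col (col : String) (out : String) : Prop := out = next_col_alt col
instance (col : String) (out : String) : Decidable (Spec_next_col col out) := by unfold Spec_next_col; infer_instance

-- ===== CLAIM (what is proved, stated in full; the proofs are below) =====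
def Claim_equal_next_col : Prop := ∀ (col : String), Dom_next_col col → Spec_next_col col (next_col col)

-- ===== LEMMAS AND PROOFS =====

-- A's loop result, described by recursion on the reversed prefix still to be processed,
-- with zs the number of positions already turned from 'Z' into 'A'.
def specRev : List Char → Nat → List Char
  | [], zs => List.replicate zs 'A'
  | c :: rest, zs =>
      if c == 'Z' then
        if rest = [] then List.replicate (zs + 2) 'A'
        else specRev rest (zs + 1)
      else rest.reverse ++ [Char.ofNat (c.toNat + 1)] ++ List.replicate zs 'A'

lemma nextColLoopA_eq_specRev (rp : List Char) (zs : Nat) :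
    nextColLoopA (rp.reverse ++ List.replicate zs 'A') rp.length = specRev rp zs := by
  induction rp generalizing zs with
  | nil => simp [nextColLoopA, specRev]
  | cons c rest ih =>
    have hlen : (rest.reverse ++ (c :: List.replicate zs 'A')).length = rest.length + 1 + zs := by
      simp; omega
    have hget : ((c :: rest).reverse ++ List.replicate zs 'A').getD rest.length 'A' = c := by
      simp [List.getD]
    have hset : ∀ d : Char,
        ((c :: rest).reverse ++ List.replicate zs 'A').set rest.length d
          = rest.reverse ++ d :: List.replicate zs 'A' := by
      intro d
      simp
    simp only [List.length_cons, nextColLoopA, hget, hset]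
    by_cases hc : c = 'Z'
    · subst hc
      simp only [beq_self_eq_true, if_pos]
      by_cases hr : rest = []
      · subst hr
        simp [specRev, List.replicate_succ]
      · have hk : (rest.length == 0) = false := by
          simp [List.length_eq_zero_iff, hr]
        have : rest.reverse ++ 'A' :: List.replicate zs 'A'
             = rest.reverse ++ List.replicate (zs + 1) 'A' := by
          simp [List.replicate_succ]
        rw [hk]
        simp only [this, ih (zs + 1)]
        simp [specRev, hr]
    · have : (c == 'Z') = false := by simp [hc]
      simp [this, specRev]

lemma specRev_eq_B (r : List Char) (zs : Nat) (h : r ≠ []) :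
    specRev r zs =
      (match r.dropWhile (· == 'Z') with
       | [] => List.replicate (r.length + zs + 1) 'A'
       | c :: rest =>
           rest.reverse ++ [Char.ofNat (c.toNat + 1)]
             ++ List.replicate ((r.takeWhile (· == 'Z')).length + zs) 'A') := by
  induction r generalizing zs with
  | nil => exact absurd rfl h
  | cons c rest ih =>
    by_cases hc : c = 'Z'
    · subst hc
      by_cases hr : rest = []
      · subst hr
        simp [specRev, List.dropWhile]
        omega
      · have hd : (('Z' :: rest).dropWhile (· == 'Z')) = rest.dropWhile (· == 'Z') := by
          simp [List.dropWhile]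
        have ht : (('Z' :: rest).takeWhile (· == 'Z')) = 'Z' :: rest.takeWhile (· == 'Z') := by
          simp [List.takeWhile]
        have := ih (zs + 1) hr
        simp only [specRev, beq_self_eq_true, if_pos, if_neg hr, this, hd, ht]
        cases hdw : rest.dropWhile (· == 'Z') with
        | nil => simp; omega
        | cons d ds => simp; omega
    · have hcb : (c == 'Z') = false := by simp [hc]
      simp [specRev, hcb, List.dropWhile, List.takeWhile]

-- ===== VERDICT (by name: the statement is the Claim_ definition above) =====
theorem next_col_spec : Claim_equal_next_col := by
  intro col _
  unfold Spec_next_col next_col next_col_alt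
  by_cases h : col.toList = []
  · simp [h, nextColLoopA]
    conv_rhs => rw [← String.ofList_toList (s := col), h]
    rfl
  · have hrev : col.toList.reverse ≠ [] := by simpa using h
    have hmain := nextColLoopA_eq_specRev col.toList.reverse 0
    simp only [List.reverse_reverse, List.append_nil, List.replicate_zero,
      List.length_reverse] at hmain
    rw [if_neg h, hmain, specRev_eq_B _ 0 hrev]
    cases hdw : col.toList.reverse.dropWhile (· == 'Z') with
    | nil => simp [hdw]
    | cons c rest => simp [hdw]
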